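-- pv_equiv track=rewrite | github.com/Bleak-bleak/CSE101 | 32fp.py | getBiasedExponent
-- ===== SOURCE A (Python) =====
-- def getBiasedExponent(exp): # exp is an integer
--     if exp < -127 or exp > 128:
--         return None
--     else:
--         exp += 127
--         New_string= bin(exp)[2:]
--         while len(New_string) <8:
--             New_string = "0" + New_string
--
--     return New_string
-- ===== SOURCE B (Python) =====
-- def getBiasedExponent(exp): # exp is an integer
--     if exp < -127 or exp > 128:
--         return None
--     value = exp + 127
--     return ''.join(str((value >> i) & 1) for i in range(7, -1, -1))
-- ===== Notes on version B (the rewrite author's own statement) =====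
-- stated objective: alternative
-- what changed: B extracts each output bit arithmetically with shifts and masks over the bit positions from high to low and joins them, instead of A's bin()-string slicing plus a while loop prepending zeros to full width.
import Mathlib
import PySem

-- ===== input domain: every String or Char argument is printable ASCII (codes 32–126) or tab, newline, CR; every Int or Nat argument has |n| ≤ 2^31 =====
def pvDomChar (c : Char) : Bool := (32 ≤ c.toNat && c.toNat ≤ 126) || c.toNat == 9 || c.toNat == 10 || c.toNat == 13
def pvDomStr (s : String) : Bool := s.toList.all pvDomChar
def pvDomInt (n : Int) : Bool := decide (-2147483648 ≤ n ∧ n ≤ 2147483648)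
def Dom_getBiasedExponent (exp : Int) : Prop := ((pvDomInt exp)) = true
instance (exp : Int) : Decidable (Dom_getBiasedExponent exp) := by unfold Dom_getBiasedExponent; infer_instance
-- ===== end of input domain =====

-- B builds the 8-char result by extracting each bit arithmetically ((value >> i) & 1 over
-- positions 7..0), instead of A's bin()-string slicing plus a '0'-prepending while loop.

-- ===== PORT A =====
-- bin(n)[2:] for a nonnegative n (Python's bin without the '0b' prefix);
-- the fuel argument only makes the recursion structural (n+1 steps always suffice)
def pvBinDigits : Nat → Nat → List Char
  | 0, _ => []
  | fuel + 1, n =>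
    if n < 2 then [if n = 1 then '1' else '0']
    else pvBinDigits fuel (n / 2) ++ [if n % 2 = 1 then '1' else '0']

-- the while-loop: prepend '0' until length ≥ 8 (fuel 8 always suffices)
def pvPad : Nat → List Char → List Char
  | 0, s => s
  | fuel + 1, s => if s.length < 8 then pvPad fuel ('0' :: s) else s

def getBiasedExponent (exp : Int) : Option String :=
  if exp < -127 ∨ exp > 128 then none
  else
    let exp' := exp + 127
    let newString := pvBinDigits (exp'.toNat + 1) exp'.toNat
    some (String.ofList (pvPad 8 newString))

-- ===== PORT B =====
def getBiasedExponent_alt (exp : Int) : Option String :=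
  if exp < -127 ∨ exp > 128 then none
  else
    let value := (exp + 127).toNat
    some (String.ofList ((PySem.List.pyRange 7 (-1) (-1)).map
      (fun i => if (value >>> i.toNat) % 2 = 1 then '1' else '0')))

-- ===== PRECONDITION & SPEC =====
def Spec_getBiasedExponent (exp : Int) (out : Option String) : Prop := out = getBiasedExponent_alt exp
instance (exp : Int) (out : Option String) : Decidable (Spec_getBiasedExponent exp out) := by unfold Spec_getBiasedExponent; infer_instance

-- ===== CLAIM (what is proved, stated in full; the proofs are below) =====
def Claim_equal_getBiasedExponent : Prop := ∀ (exp : Int), Dom_getBiasedExponent exp → Spec_getBiasedExponent exp (getBiasedExponent exp)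

-- ===== LEMMAS AND PROOFS =====

-- In range, both ports agree: 256 closed instances, checked by the kernel.
set_option maxRecDepth 4000 in
theorem pv_agree_in_range : ∀ k : Nat, k < 256 →
    getBiasedExponent ((k : Int) - 127) = getBiasedExponent_alt ((k : Int) - 127) := by
  decide

-- ===== VERDICT (by name: the statement is the Claim_ definition above) =====
theorem getBiasedExponent_spec : Claim_equal_getBiasedExponent := by
  intro exp _
  unfold Spec_getBiasedExponent
  by_cases h : exp < -127 ∨ exp > 128
  · simp [getBiasedExponent, getBiasedExponent_alt, h]
  · have hk : ∃ k : Nat, k < 256 ∧ exp = (k : Int) - 127 := by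
      refine ⟨(exp + 127).toNat, by omega, by omega⟩
    obtain ⟨k, hk, rfl⟩ := hk
    exact pv_agree_in_range k hk
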